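-- pv_equiv track=rewrite | github.com/veera2508/AI-Lab | S-4/191-S4.py | checkld
-- ===== SOURCE A (Python) =====
-- def checkld(arr, i, j):
--     cost = 0
--     l = len(arr[0])
--     m , n = i-1, j+1
--     while m >= 0 and n < l:
--         cost += arr[m][n]
--         m -= 1
--         n += 1
--     m, n = i+1, j-1
--     while m < l and n >= 0:
--         cost += arr[m][n]
--         m += 1
--         n -= 1
--     return cost
-- ===== SOURCE B (Python) =====
-- def checkld(arr, i, j):
--     # One indexed sweep over the anti-diagonal r + c = i + j instead of two pointer walks.
--     s = i + j
--     l = len(arr[0])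
--     return sum(arr[r][s - r] for r in range(l) if r != i and 0 <= s - r < l)
-- ===== Notes on version B (the rewrite author's own statement) =====
-- stated objective: alternative
-- what changed: B replaces A's two outward pointer walks (m,n stepping in opposite directions from (i,j)) with a single indexed sweep over rows r in range(len(arr[0])), deriving the column from the anti-diagonal invariant c = i+j-r and skipping r == i; Pre_ excludes inputs where A raises IndexError or returns accidental values via negative-index wraparound or walks leaving the l-by-l index window on non-square grids.
-- outside the precondition, e.g. on checkld([[1]], 1, -2): A returns 1, B returns 0; on checkld([[-4, 2], [], [3, 8], [7]], 3, 0): A returns 8, B returns 0; on checkld([[1, 2], [3, 4]], -2, 1): A returns 3, B returns 0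
import Mathlib
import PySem

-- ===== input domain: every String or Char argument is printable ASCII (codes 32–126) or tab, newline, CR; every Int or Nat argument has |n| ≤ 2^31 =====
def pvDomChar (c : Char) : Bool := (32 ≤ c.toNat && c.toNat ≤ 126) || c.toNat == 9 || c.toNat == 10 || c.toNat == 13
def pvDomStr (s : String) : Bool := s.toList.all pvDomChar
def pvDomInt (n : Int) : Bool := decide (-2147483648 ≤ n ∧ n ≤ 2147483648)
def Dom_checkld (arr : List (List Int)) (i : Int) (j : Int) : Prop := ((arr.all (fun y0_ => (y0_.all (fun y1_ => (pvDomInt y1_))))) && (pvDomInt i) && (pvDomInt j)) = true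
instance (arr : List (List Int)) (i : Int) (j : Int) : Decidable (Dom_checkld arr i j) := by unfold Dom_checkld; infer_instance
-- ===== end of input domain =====

-- B replaces A's two outward pointer walks with a single indexed sweep over rows,
-- deriving the column from the anti-diagonal invariant c = i+j-r (objective: alternative).

-- arr[m][n] (Python semantics; inside Pre_ every access is in range, so the defaults are never hit)
def pvAt (arr : List (List Int)) (m n : Int) : Int :=
  PySem.List.pyGetD (PySem.List.pyGetD arr m []) n 0

-- ===== PORT A =====
-- 'while m >= 0 and n < l: cost += arr[m][n]; m -= 1; n += 1'
def checkldLoop1 (arr : List (List Int)) (l m n cost : Int) : Int :=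
  if _h : 0 ≤ m ∧ n < l then
    checkldLoop1 arr l (m - 1) (n + 1) (cost + pvAt arr m n)
  else cost
termination_by (m + 1).toNat
decreasing_by omega

-- 'while m < l and n >= 0: cost += arr[m][n]; m += 1; n -= 1'
def checkldLoop2 (arr : List (List Int)) (l m n cost : Int) : Int :=
  if _h : m < l ∧ 0 ≤ n then
    checkldLoop2 arr l (m + 1) (n - 1) (cost + pvAt arr m n)
  else cost
termination_by (n + 1).toNat
decreasing_by omega

def checkld (arr : List (List Int)) (i : Int) (j : Int) : Int :=
  let cost : Int := 0
  let l : Int := ((PySem.List.pyGetD arr 0 []).length : Int)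
  let cost1 := checkldLoop1 arr l (i - 1) (j + 1) cost
  checkldLoop2 arr l (i + 1) (j - 1) cost1

-- ===== PORT B =====
-- 'sum(arr[r][s-r] for r in range(l) if r != i and 0 <= s-r < l)'
def checkld_alt (arr : List (List Int)) (i : Int) (j : Int) : Int :=
  let s := i + j
  let l : Int := ((PySem.List.pyGetD arr 0 []).length : Int)
  (PySem.List.pyRange 0 l 1).foldl
    (fun acc r => if r ≠ i ∧ 0 ≤ s - r ∧ s - r < l then acc + pvAt arr r (s - r) else acc) 0

-- ===== PRECONDITION & SPEC =====
-- Pre_ admits exactly the inputs on which A's two anti-diagonal walks stay inside the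
-- l x l index window (l = len(arr[0])) and every touched row/cell exists.  It excludes
-- inputs where A raises IndexError, and inputs on which A's accidental behaviour is
-- unmatchable by design: negative Python indices wrapping around, and walks that leave
-- the window on non-square grids (see claim.json cites).
def Pre_checkld (arr : List (List Int)) (i : Int) (j : Int) : Prop :=
  arr ≠ [] ∧
  (max 0 (i + j - ((arr.headD []).length : Int) + 1) ≤ i - 1 →
    i - 1 ≤ min (((arr.headD []).length : Int) - 1) (i + j)) ∧
  (i + 1 ≤ min (((arr.headD []).length : Int) - 1) (i + j) →
    max 0 (i + j - ((arr.headD []).length : Int) + 1) ≤ i + 1) ∧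
  (max 0 (i + j - ((arr.headD []).length : Int) + 1)
      ≤ min (((arr.headD []).length : Int) - 1) (i + j) →
    min (((arr.headD []).length : Int) - 1) (i + j) < (arr.length : Int)) ∧
  (∀ k : Nat, k < arr.length →
    max 0 (i + j - ((arr.headD []).length : Int) + 1) ≤ (k : Int) →
    (k : Int) ≤ min (((arr.headD []).length : Int) - 1) (i + j) →
    (k : Int) ≠ i →
    i + j - (k : Int) < ((arr.getD k []).length : Int))
instance (arr : List (List Int)) (i : Int) (j : Int) : Decidable (Pre_checkld arr i j) := by
  unfold Pre_checkld; infer_instance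

def pvWitness_checkld : List (List Int) × Int × Int := ([[1, 2], [3, 4]], 0, 1)

def Spec_checkld (arr : List (List Int)) (i : Int) (j : Int) (out : Int) : Prop := out = checkld_alt arr i j
instance (arr : List (List Int)) (i : Int) (j : Int) (out : Int) : Decidable (Spec_checkld arr i j out) := by unfold Spec_checkld; infer_instance

-- ===== CLAIM (what is proved, stated in full; the proofs are below) =====
def Claim_equal_checkld : Prop := ∀ (arr : List (List Int)) (i : Int) (j : Int), Dom_checkld arr i j → Pre_checkld arr i j → Spec_checkld arr i j (checkld arr i j)

-- ===== LEMMAS AND PROOFS =====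

lemma icc_sum_top (f : Int → Int) (a b : Int) (h : a ≤ b) :
    ∑ r ∈ Finset.Icc a b, f r = (∑ r ∈ Finset.Icc a (b - 1), f r) + f b := by
  have hset : Finset.Icc a b = insert b (Finset.Icc a (b - 1)) := by
    ext x; simp [Finset.mem_Icc]; omega
  rw [hset, Finset.sum_insert (by simp [Finset.mem_Icc])]
  ring

lemma icc_sum_bot (f : Int → Int) (a b : Int) (h : a ≤ b) :
    ∑ r ∈ Finset.Icc a b, f r = f a + ∑ r ∈ Finset.Icc (a + 1) b, f r := by
  have hset : Finset.Icc a b = insert a (Finset.Icc (a + 1) b) := by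
    ext x; simp [Finset.mem_Icc]; omega
  rw [hset, Finset.sum_insert (by simp [Finset.mem_Icc])]

-- loop 1 sums rows from max 0 (s-l+1) up to m (walked downward), along n = s - m
lemma loop1_eq (arr : List (List Int)) (l s : Int) :
    ∀ (k : Nat) (m cost : Int), (m + 1).toNat ≤ k →
      checkldLoop1 arr l m (s - m) cost
        = cost + ∑ r ∈ Finset.Icc (max 0 (s - l + 1)) m, pvAt arr r (s - r) := by
  intro k
  induction k with
  | zero =>
    intro m cost hm
    rw [checkldLoop1, dif_neg (by omega)]
    rw [Finset.Icc_eq_empty (by omega), Finset.sum_empty]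
    ring
  | succ k ih =>
    intro m cost hm
    rw [checkldLoop1]
    by_cases h : 0 ≤ m ∧ s - m < l
    · rw [dif_pos h]
      have harg : s - m + 1 = s - (m - 1) := by ring
      rw [harg, ih (m - 1) _ (by omega)]
      rw [icc_sum_top (fun r => pvAt arr r (s - r)) _ m (by omega)]
      ring
    · rw [dif_neg h]
      rw [Finset.Icc_eq_empty (by omega), Finset.sum_empty]
      ring

-- loop 2 sums rows from m (walked upward) to min (l-1) s, along n = s - m
lemma loop2_eq (arr : List (List Int)) (l s : Int) :
    ∀ (k : Nat) (m cost : Int), (s - m + 1).toNat ≤ k →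
      checkldLoop2 arr l m (s - m) cost
        = cost + ∑ r ∈ Finset.Icc m (min (l - 1) s), pvAt arr r (s - r) := by
  intro k
  induction k with
  | zero =>
    intro m cost hm
    rw [checkldLoop2, dif_neg (by omega)]
    rw [Finset.Icc_eq_empty (by omega), Finset.sum_empty]
    ring
  | succ k ih =>
    intro m cost hm
    rw [checkldLoop2]
    by_cases h : m < l ∧ 0 ≤ s - m
    · rw [dif_pos h]
      have harg : s - m - 1 = s - (m + 1) := by ring
      rw [harg, ih (m + 1) _ (by omega)]
      rw [icc_sum_bot (fun r => pvAt arr r (s - r)) m _ (by omega)]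
      ring
    · rw [dif_neg h]
      rw [Finset.Icc_eq_empty (by omega), Finset.sum_empty]
      ring

-- the B-side fold over range(l) is a sum over Finset.Icc 0 (l-1)
lemma sum_map_pyRange (g : Int → Int) :
    ∀ (N : Nat) (l : Int), l = (N : Int) →
      ((PySem.List.pyRange 0 l 1).map g).sum = ∑ r ∈ Finset.Icc (0 : Int) (l - 1), g r := by
  intro N
  induction N with
  | zero =>
    intro l hl
    rw [hl]
    rw [PySem.List.pyRange_one_eq_nil (by omega), Finset.Icc_eq_empty (by omega)]
    simp
  | succ N ih =>
    intro l hl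
    have h1 : l = (N : Int) + 1 := by omega
    rw [h1, PySem.List.pyRange_one_succ_right (by omega)]
    rw [List.map_append, List.sum_append, ih (N : Int) rfl]
    rw [icc_sum_top g 0 ((N : Int) + 1 - 1) (by omega)]
    simp

lemma alt_eq_sum (arr : List (List Int)) (i j l : Int)
    (hl : l = ((PySem.List.pyGetD arr 0 []).length : Int)) :
    checkld_alt arr i j
      = ∑ r ∈ Finset.Icc (0 : Int) (l - 1),
          if r ≠ i ∧ 0 ≤ i + j - r ∧ i + j - r < l then pvAt arr r (i + j - r) else 0 := by
  unfold checkld_alt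
  rw [← hl]
  have hbody :
      (fun (acc r : Int) => if r ≠ i ∧ 0 ≤ i + j - r ∧ i + j - r < l then acc + pvAt arr r (i + j - r) else acc)
        = fun acc r => acc + (if r ≠ i ∧ 0 ≤ i + j - r ∧ i + j - r < l then pvAt arr r (i + j - r) else 0) := by
    funext acc r
    split <;> simp
  simp only [hbody]
  rw [PySem.List.foldl_add]
  rw [sum_map_pyRange _ l.toNat l (by
    have : (0 : Int) ≤ ((PySem.List.pyGetD arr 0 []).length : Int) := by positivity
    omega)]
  ring

-- ===== VERDICT (by name: the statement is the Claim_ definition above) =====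
theorem checkld_spec : Claim_equal_checkld := by
  intro arr i j _ hpre
  obtain ⟨hne, h1, h2, _h3, _h4⟩ := hpre
  show checkld arr i j = checkld_alt arr i j
  obtain ⟨row0, rest, rfl⟩ : ∃ r rs, arr = r :: rs := by
    cases arr with
    | nil => exact absurd rfl hne
    | cons r rs => exact ⟨r, rs, rfl⟩
  set arr := row0 :: rest with harr
  set l : Int := (row0.length : Int) with hldef
  have hhead : ((PySem.List.pyGetD arr 0 []).length : Int) = l := by
    simp [harr, PySem.List.pyGetD_zero_cons, hldef]
  simp only [harr, List.headD_cons] at h1 h2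
  set s := i + j with hs
  set lo := max 0 (s - l + 1) with hlo
  set hi := min (l - 1) s with hhi
  -- A as two interval sums
  have hA : checkld arr i j
      = (∑ r ∈ Finset.Icc lo (i - 1), pvAt arr r (s - r))
        + ∑ r ∈ Finset.Icc (i + 1) hi, pvAt arr r (s - r) := by
    unfold checkld
    simp only [hhead]
    have ha : j + 1 = s - (i - 1) := by omega
    have hb : j - 1 = s - (i + 1) := by omega
    rw [ha, hb]
    rw [loop1_eq arr l s (i - 1 + 1).toNat (i - 1) 0 (le_refl _)]
    rw [loop2_eq arr l s (s - (i + 1) + 1).toNat (i + 1) _ (le_refl _)]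
    rw [← hlo, ← hhi]
    ring
  -- B as one filtered interval sum
  have hB : checkld_alt arr i j
      = ∑ r ∈ Finset.Icc (0 : Int) (l - 1),
          if r ≠ i ∧ 0 ≤ s - r ∧ s - r < l then pvAt arr r (s - r) else 0 :=
    alt_eq_sum arr i j l hhead.symm
  rw [hA, hB, ← Finset.sum_filter]
  rw [← Finset.sum_union (by
    rw [Finset.disjoint_left]
    intro r hr1 hr2
    simp only [Finset.mem_Icc] at hr1 hr2
    omega)]
  congr 1
  ext r
  simp only [Finset.mem_union, Finset.mem_filter, Finset.mem_Icc]
  omega
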